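-- pv_equiv track=rewrite | github.com/0xA2/Merkle-Hellman-Knapsack-and-LLL | knapsack.py | verify_privatekey
-- ===== SOURCE A (Python) =====
-- def verify_privatekey(ct,private_key):
-- 	if egcd(private_key[1],private_key[2])[0] != 1:
-- 		return False
-- 	sum = 0
-- 	for i in range(0,len(private_key[0])):
-- 		if private_key[0][i] < sum:
-- 			return False
-- 		sum += private_key[0][i]
-- 	return True
--
-- def egcd(a,b):
-- 	if a == 0:
-- 		return (b,0,1)
-- 	g,y,x = egcd(b%a,a)
-- 	return (g,x-(b//a)*y,y)
-- ===== SOURCE B (Python) =====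
-- def verify_privatekey(ct, private_key):
--     # iterative Euclid: same first component as the recursive egcd
--     a, b = private_key[1], private_key[2]
--     while a != 0:
--         a, b = b % a, a
--     if b != 1:
--         return False
--     w = private_key[0]
--     return all(w[i] >= sum(w[:i]) for i in range(len(w)))
-- ===== Notes on version B (the rewrite author's own statement) =====
-- stated objective: alternative
-- what changed: Replaces the recursive extended gcd by an iterative plain Euclid loop (only the gcd is needed) and the running-sum accumulator loop by an all() over indices that rescans and sums each prefix.
import Mathlib
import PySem

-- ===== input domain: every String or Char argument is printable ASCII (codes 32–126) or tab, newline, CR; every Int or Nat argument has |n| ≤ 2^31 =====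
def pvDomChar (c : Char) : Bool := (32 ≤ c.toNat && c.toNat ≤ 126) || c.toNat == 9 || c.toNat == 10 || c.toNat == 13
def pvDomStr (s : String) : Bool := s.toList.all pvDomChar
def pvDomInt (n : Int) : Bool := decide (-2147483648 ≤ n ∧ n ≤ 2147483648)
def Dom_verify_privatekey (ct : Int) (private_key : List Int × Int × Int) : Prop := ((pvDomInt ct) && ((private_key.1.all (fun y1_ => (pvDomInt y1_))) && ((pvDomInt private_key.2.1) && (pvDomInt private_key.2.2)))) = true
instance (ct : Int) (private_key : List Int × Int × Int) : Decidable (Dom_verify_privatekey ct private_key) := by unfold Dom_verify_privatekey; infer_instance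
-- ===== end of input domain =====

-- B replaces the recursive extended gcd by an iterative Euclid loop and the running-sum
-- accumulator loop by an all() over indices that rescans each prefix (alternative decomposition).


-- ===== PORT A =====
-- termination measure for Python's b % a (divisor-signed): |b % a| < |a| for a ≠ 0
theorem pyMod_natAbs_lt (b a : Int) (h : a ≠ 0) : (PySem.Int.mod b a).natAbs < a.natAbs := by
  rcases h.lt_or_gt with hn | hp
  · have := PySem.Int.mod_neg_bounds (a := b) hn; omega
  · have h1 := PySem.Int.mod_nonneg (a := b) hp
    have h2 := PySem.Int.mod_lt (a := b) hp
    omega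

-- recursive extended gcd, exactly A's egcd (Python % and // via PySem)
def egcd (a b : Int) : Int × Int × Int :=
  if h : a = 0 then (b, 0, 1)
  else
    let r := egcd (PySem.Int.mod b a) a
    (r.1, r.2.2 - (PySem.Int.floordiv b a) * r.2.1, r.2.1)
termination_by a.natAbs
decreasing_by exact pyMod_natAbs_lt b _ h

-- A's for-loop over indices with running sum, as structural recursion over the list
def vpLoopA : List Int → Int → Bool
  | [], _ => true
  | x :: xs, s => if x < s then false else vpLoopA xs (s + x)

def verify_privatekey (ct : Int) (private_key : List Int × Int × Int) : Bool :=
  if (egcd private_key.2.1 private_key.2.2).1 ≠ 1 then false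
  else vpLoopA private_key.1 0

-- ===== PORT B =====
-- iterative Euclid loop (B's while-loop)
def gcdLoop (a b : Int) : Int :=
  if h : a = 0 then b
  else gcdLoop (PySem.Int.mod b a) a
termination_by a.natAbs
decreasing_by exact pyMod_natAbs_lt b _ h

def verify_privatekey_alt (ct : Int) (private_key : List Int × Int × Int) : Bool :=
  if gcdLoop private_key.2.1 private_key.2.2 ≠ 1 then false
  else
    (List.range private_key.1.length).all
      (fun i => decide ((private_key.1.take i).sum ≤ private_key.1.getD i 0))

-- ===== PRECONDITION & SPEC =====
def Spec_verify_privatekey (ct : Int) (private_key : List Int × Int × Int) (out : Bool) : Prop := out = verify_privatekey_alt ct private_key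
instance (ct : Int) (private_key : List Int × Int × Int) (out : Bool) : Decidable (Spec_verify_privatekey ct private_key out) := by unfold Spec_verify_privatekey; infer_instance

-- ===== CLAIM (what is proved, stated in full; the proofs are below) =====
def Claim_equal_verify_privatekey : Prop := ∀ (ct : Int) (private_key : List Int × Int × Int), Dom_verify_privatekey ct private_key → Spec_verify_privatekey ct private_key (verify_privatekey ct private_key)

-- ===== LEMMAS AND PROOFS =====
theorem egcd_fst (a b : Int) : (egcd a b).1 = gcdLoop a b := by
  induction a, b using egcd.induct with
  | _ => rw [egcd, gcdLoop]; simp_all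

theorem vpLoopA_eq (w : List Int) (s : Int) :
    vpLoopA w s = (List.range w.length).all
      (fun i => decide (s + (w.take i).sum ≤ w.getD i 0)) := by
  induction w generalizing s with
  | nil => simp [vpLoopA]
  | cons x xs ih =>
    rw [vpLoopA]
    by_cases h : x < s
    · rw [if_pos h]
      simp [List.range_succ_eq_map, show ¬ s ≤ x by omega]
    · rw [if_neg h, ih (s + x)]
      simp only [List.length_cons, List.range_succ_eq_map, List.all_cons, List.all_map,
        Function.comp_def, List.take_succ_cons, List.sum_cons, List.getD_cons_succ,
        List.take_zero, List.sum_nil, List.getD_cons_zero, add_zero, add_assoc,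
        show s ≤ x by omega, decide_true, Bool.true_and]

-- ===== VERDICT (by name: the statement is the Claim_ definition above) =====
theorem verify_privatekey_spec : Claim_equal_verify_privatekey := by
  intro ct pk _
  unfold Spec_verify_privatekey verify_privatekey verify_privatekey_alt
  rw [egcd_fst, vpLoopA_eq]
  by_cases h : gcdLoop pk.2.1 pk.2.2 = 1 <;> simp [h]
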